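-- pv_equiv track=rewrite | github.com/apache/skywalking-banyandb-client-proto | scripts/sync_proto.py | cleanup_empty_rpc_blocks
-- ===== SOURCE A (Python) =====
-- from typing import Dict, List, Set, Tuple
--
-- def cleanup_empty_rpc_blocks(body_lines: List[str]) -> List[str]:
--     """
--     Remove empty {} blocks from RPC definitions.
--     Converts:
--       rpc Query(QueryRequest) returns (QueryResponse) {
--       }
--     to:
--       rpc Query(QueryRequest) returns (QueryResponse);
--     """
--     if not body_lines:
--         return body_lines
--
--     result = []
--     i = 0
--     while i < len(body_lines):
--         line = body_lines[i]
--         stripped = line.strip()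
--
--         # Check if this is an RPC line ending with {
--         if 'rpc ' in stripped and stripped.endswith('{'):
--             # Look ahead to see if the next non-empty line is just }
--             j = i + 1
--             # Skip empty lines
--             while j < len(body_lines) and not body_lines[j].strip():
--                 j += 1
--
--             if j < len(body_lines) and body_lines[j].strip() == '}':
--                 # Found empty RPC block, remove the { and the }
--                 # Replace the rpc line to remove the { at the end
--                 rpc_line = line.rstrip().rstrip('{').rstrip()
--                 result.append(rpc_line + ';')
--                 # Skip the closing }
--                 i = j + 1
--                 continue
--
--         result.append(line)
--         i += 1
--
--     return result
-- ===== SOURCE B (Python) =====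
-- from typing import List
--
-- def _is_rpc_open(line: str) -> bool:
--     s = line.strip()
--     return 'rpc ' in s and s.endswith('{')
--
-- def _collapse(line: str) -> str:
--     return line.rstrip().rstrip('{').rstrip() + ';'
--
-- def cleanup_empty_rpc_blocks(body_lines: List[str]) -> List[str]:
--     """Single forward pass keeping a pending rpc-'{' line and buffered blanks; no index look-ahead."""
--     result: List[str] = []
--     pending = None          # the rpc line waiting for a lone '}' closer
--     blanks: List[str] = []  # blank lines seen after the pending rpc line
--     for line in body_lines:
--         if pending is None:
--             if _is_rpc_open(line):
--                 pending = line
--             else: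
--                 result.append(line)
--         elif not line.strip():
--             blanks.append(line)
--         elif line.strip() == '}':
--             result.append(_collapse(pending))
--             pending, blanks = None, []
--         else:
--             result.append(pending)
--             result.extend(blanks)
--             pending, blanks = None, []
--             if _is_rpc_open(line):
--                 pending = line
--             else:
--                 result.append(line)
--     if pending is not None:
--         result.append(pending)
--         result.extend(blanks)
--     return result
-- ===== Notes on version B (the rewrite author's own statement) =====
-- stated objective: alternative
-- what changed: Replaces A's index loop with an inner look-ahead scan over blank lines by a single forward state-machine pass that keeps a pending rpc line plus buffered blanks and flushes or collapses them on the next non-blank line.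
import Mathlib
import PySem

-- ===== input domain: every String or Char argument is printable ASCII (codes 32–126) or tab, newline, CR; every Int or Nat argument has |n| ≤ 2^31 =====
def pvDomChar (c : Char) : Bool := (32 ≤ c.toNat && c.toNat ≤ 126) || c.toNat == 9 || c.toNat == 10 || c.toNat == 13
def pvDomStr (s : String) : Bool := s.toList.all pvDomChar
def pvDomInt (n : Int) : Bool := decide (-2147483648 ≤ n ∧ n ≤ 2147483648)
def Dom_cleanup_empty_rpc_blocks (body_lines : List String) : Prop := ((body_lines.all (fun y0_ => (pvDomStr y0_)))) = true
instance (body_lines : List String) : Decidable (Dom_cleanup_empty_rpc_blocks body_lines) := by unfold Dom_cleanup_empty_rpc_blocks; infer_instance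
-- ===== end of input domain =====

-- B replaces A's index loop with inner look-ahead scans by a single forward pass keeping a
-- pending rpc line and buffered blanks (objective: alternative decomposition, same cost).

-- hand port of Python's str.rstrip('{') (no PySem primitive takes a char set on one side only):
-- exact — removes every trailing '{' character.
def pvRstripBraces (s : String) : String :=
  String.ofList ((s.toList.reverse.dropWhile (fun c => c == '{')).reverse)

-- ===== PORT A =====
def cleanup_empty_rpc_blocks (body_lines : List String) : List String :=
  match body_lines with
  | [] => []
  | line :: rest =>
    let stripped := PySem.Str.strip line
    if PySem.Str.isIn "rpc " stripped && PySem.Str.endswith stripped "{" then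
      -- inner while: skip empty lines from i+1
      match hdrop : rest.dropWhile (fun l => PySem.Str.strip l == "") with
      | r :: rs =>
        if PySem.Str.strip r == "}" then
          (PySem.Str.rstrip (pvRstripBraces (PySem.Str.rstrip line)) ++ ";") ::
            cleanup_empty_rpc_blocks rs
        else line :: cleanup_empty_rpc_blocks rest
      | [] => line :: cleanup_empty_rpc_blocks rest
    else line :: cleanup_empty_rpc_blocks rest
termination_by body_lines.length
decreasing_by
  · have hs := (List.dropWhile_sublist (l := rest)
      (p := fun l => PySem.Str.strip l == "")).length_le
    rw [hdrop] at hs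
    simp at hs ⊢; omega
  · simp
  · simp
  · simp

-- ===== PORT B =====
def pvIsRpcOpenB (line : String) : Bool :=
  let s := PySem.Str.strip line
  PySem.Str.isIn "rpc " s && PySem.Str.endswith s "{"

def pvCollapseB (line : String) : String :=
  PySem.Str.rstrip (pvRstripBraces (PySem.Str.rstrip line)) ++ ";"

def pvStepB (st : List String × Option (String × List String)) (line : String) :
    List String × Option (String × List String) :=
  match st with
  | (res, none) =>
    if pvIsRpcOpenB line then (res, some (line, [])) else (res ++ [line], none)
  | (res, some (p, blanks)) =>
    if PySem.Str.strip line == "" then (res, some (p, blanks ++ [line]))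
    else if PySem.Str.strip line == "}" then (res ++ [pvCollapseB p], none)
    else
      let res' := res ++ p :: blanks
      if pvIsRpcOpenB line then (res', some (line, [])) else (res' ++ [line], none)

def pvFinishB : List String × Option (String × List String) → List String
  | (res, none) => res
  | (res, some (p, blanks)) => res ++ p :: blanks

def cleanup_empty_rpc_blocks_alt (body_lines : List String) : List String :=
  pvFinishB (body_lines.foldl pvStepB ([], none))

-- ===== PRECONDITION & SPEC =====
def Spec_cleanup_empty_rpc_blocks (body_lines : List String) (out : List String) : Prop := out = cleanup_empty_rpc_blocks_alt body_lines
instance (body_lines : List String) (out : List String) : Decidable (Spec_cleanup_empty_rpc_blocks body_lines out) := by unfold Spec_cleanup_empty_rpc_blocks; infer_instance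

-- ===== CLAIM (what is proved, stated in full; the proofs are below) =====
def Claim_equal_cleanup_empty_rpc_blocks : Prop := ∀ (body_lines : List String), Dom_cleanup_empty_rpc_blocks body_lines → Spec_cleanup_empty_rpc_blocks body_lines (cleanup_empty_rpc_blocks body_lines)

-- ===== LEMMAS AND PROOFS =====

theorem pvBlankNotRpc (l : String) (h : (PySem.Str.strip l == "") = true) :
    pvIsRpcOpenB l = false := by
  have hs : PySem.Str.strip l = "" := by simpa using h
  simp [pvIsRpcOpenB, hs]
  decide

set_option maxHeartbeats 1000000 in
theorem pvA_nil : cleanup_empty_rpc_blocks [] = [] := by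
  simp [cleanup_empty_rpc_blocks]

set_option maxHeartbeats 1000000 in
theorem pvA_cons_notRpc (l : String) (xs : List String) (h : pvIsRpcOpenB l = false) :
    cleanup_empty_rpc_blocks (l :: xs) = l :: cleanup_empty_rpc_blocks xs := by
  simp only [pvIsRpcOpenB] at h
  simp only [Bool.and_eq_false_iff] at h
  rw [cleanup_empty_rpc_blocks]
  rw [if_neg (by simp only [Bool.and_eq_true]; rintro ⟨h1, h2⟩; rcases h with h | h <;> simp_all)]

theorem pvDropWhileBlanks (p : String → Bool) (bs : List String)
    (hb : ∀ b ∈ bs, p b = true) (l : String) (hl : p l = false) (xs : List String) :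
    List.dropWhile p (bs ++ l :: xs) = l :: xs := by
  induction bs with
  | nil => simp [hl]
  | cons b bs ih =>
    have := hb b (by simp)
    simp only [List.cons_append, List.dropWhile, this]
    exact ih (fun b hbmem => hb b (by simp [hbmem]))

set_option maxHeartbeats 1000000 in
theorem pvA_rpc_close (l r : String) (rest rs : List String)
    (hl : pvIsRpcOpenB l = true)
    (hdrop : rest.dropWhile (fun x => PySem.Str.strip x == "") = r :: rs)
    (hr : (PySem.Str.strip r == "}") = true) :
    cleanup_empty_rpc_blocks (l :: rest) = pvCollapseB l :: cleanup_empty_rpc_blocks rs := by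
  simp only [pvIsRpcOpenB] at hl
  rw [cleanup_empty_rpc_blocks]
  rw [if_pos hl]
  rw [pvCollapseB]
  split
  next r' rs' heq =>
    rw [hdrop] at heq
    cases heq
    rw [if_pos (by simpa using hr)]
  next heq => rw [hdrop] at heq; cases heq

set_option maxHeartbeats 1000000 in
theorem pvA_rpc_fail (l : String) (rest : List String)
    (hfail : rest.dropWhile (fun x => PySem.Str.strip x == "") = [] ∨
      ∃ r rs, rest.dropWhile (fun x => PySem.Str.strip x == "") = r :: rs ∧
        (PySem.Str.strip r == "}") = false) :
    cleanup_empty_rpc_blocks (l :: rest) = l :: cleanup_empty_rpc_blocks rest := by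
  rw [cleanup_empty_rpc_blocks]
  by_cases hl : (PySem.Str.isIn "rpc " (PySem.Str.strip l) &&
      PySem.Str.endswith (PySem.Str.strip l) "{") = true
  · rw [if_pos hl]
    split
    next r' rs' heq =>
      rcases hfail with h | ⟨r, rs, h, hr⟩
      · rw [h] at heq; cases heq
      · rw [h] at heq; cases heq
        rw [if_neg (by simpa using hr)]
    next => rfl
  · rw [if_neg hl]

theorem pvA_blankPrefix (bs : List String) (hb : ∀ b ∈ bs, (PySem.Str.strip b == "") = true)
    (xs : List String) :
    cleanup_empty_rpc_blocks (bs ++ xs) = bs ++ cleanup_empty_rpc_blocks xs := by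
  induction bs with
  | nil => simp
  | cons b bs ih =>
    have hnb := pvBlankNotRpc b (hb b (by simp))
    rw [List.cons_append, pvA_cons_notRpc b _ hnb,
      ih (fun b hbmem => hb b (by simp [hbmem]))]
    simp

theorem pvA_allBlank (bs : List String) (hb : ∀ b ∈ bs, (PySem.Str.strip b == "") = true) :
    cleanup_empty_rpc_blocks bs = bs := by
  have := pvA_blankPrefix bs hb []
  simpa [pvA_nil] using this

def pvPendLines : Option (String × List String) → List String
  | none => []
  | some (p, blanks) => p :: blanks

def pvInvB : Option (String × List String) → Prop
  | none => True
  | some (p, blanks) => pvIsRpcOpenB p = true ∧ ∀ b ∈ blanks, (PySem.Str.strip b == "") = true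

theorem pvMain (rest : List String) :
    ∀ (res : List String) (st : Option (String × List String)), pvInvB st →
      pvFinishB (rest.foldl pvStepB (res, st)) =
        res ++ cleanup_empty_rpc_blocks (pvPendLines st ++ rest) := by
  induction rest with
  | nil =>
    intro res st hst
    cases st with
    | none => simp [pvFinishB, pvPendLines, pvA_nil]
    | some pb =>
      obtain ⟨p, blanks⟩ := pb
      obtain ⟨hp, hb⟩ := hst
      simp only [List.foldl_nil, pvFinishB, pvPendLines, List.append_nil]
      rw [pvA_rpc_fail p blanks (Or.inl (by rw [List.dropWhile_eq_nil_iff]; exact hb)),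
        pvA_allBlank blanks hb]
  | cons l rest ih =>
    intro res st hst
    rw [List.foldl_cons]
    cases st with
    | none =>
      simp only [pvPendLines, List.nil_append]
      by_cases hl : pvIsRpcOpenB l = true
      · rw [show pvStepB (res, none) l = (res, some (l, [])) by simp [pvStepB, hl]]
        rw [ih res (some (l, [])) ⟨hl, by simp⟩]
        simp [pvPendLines]
      · replace hl : pvIsRpcOpenB l = false := by simpa using hl
        rw [show pvStepB (res, none) l = (res ++ [l], none) by simp [pvStepB, hl]]
        rw [ih (res ++ [l]) none trivial, pvA_cons_notRpc l rest hl]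
        simp [pvPendLines]
    | some pb =>
      obtain ⟨p, blanks⟩ := pb
      obtain ⟨hp, hb⟩ := hst
      simp only [pvPendLines]
      by_cases hblank : (PySem.Str.strip l == "") = true
      · rw [show pvStepB (res, some (p, blanks)) l = (res, some (p, blanks ++ [l])) by
          simp only [pvStepB]; rw [if_pos hblank]]
        have hb' : ∀ b ∈ blanks ++ [l], (PySem.Str.strip b == "") = true := by
          intro b hbm
          rcases List.mem_append.mp hbm with h | h
          · exact hb b h
          · rw [List.mem_singleton.mp h]; exact hblank
        rw [ih res (some (p, blanks ++ [l])) ⟨hp, hb'⟩]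
        simp [pvPendLines]
      · replace hblank : (PySem.Str.strip l == "") = false := by simpa using hblank
        have hdrop := pvDropWhileBlanks (fun x => PySem.Str.strip x == "") blanks hb l hblank rest
        by_cases hclose : (PySem.Str.strip l == "}") = true
        · rw [show pvStepB (res, some (p, blanks)) l = (res ++ [pvCollapseB p], none) by
            simp only [pvStepB]; rw [if_neg (by simp [hblank]), if_pos hclose]]
          rw [ih (res ++ [pvCollapseB p]) none trivial]
          rw [show p :: blanks ++ l :: rest = p :: (blanks ++ l :: rest) by simp]
          rw [pvA_rpc_close p l (blanks ++ l :: rest) rest hp hdrop hclose]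
          simp [pvPendLines]
        · replace hclose : (PySem.Str.strip l == "}") = false := by simpa using hclose
          have hA : cleanup_empty_rpc_blocks (p :: (blanks ++ l :: rest)) =
              p :: (blanks ++ cleanup_empty_rpc_blocks (l :: rest)) := by
            rw [pvA_rpc_fail p (blanks ++ l :: rest)
              (Or.inr ⟨l, rest, hdrop, hclose⟩), pvA_blankPrefix blanks hb]
          by_cases hl : pvIsRpcOpenB l = true
          · rw [show pvStepB (res, some (p, blanks)) l = (res ++ p :: blanks, some (l, [])) by
              simp only [pvStepB]
              rw [if_neg (by simp [hblank]), if_neg (by simp [hclose]), if_pos hl]]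
            rw [ih (res ++ p :: blanks) (some (l, [])) ⟨hl, by simp⟩]
            rw [show p :: blanks ++ l :: rest = p :: (blanks ++ l :: rest) by simp, hA]
            simp [pvPendLines]
          · replace hl : pvIsRpcOpenB l = false := by simpa using hl
            rw [show pvStepB (res, some (p, blanks)) l = (res ++ (p :: blanks) ++ [l], none) by
              simp only [pvStepB]
              rw [if_neg (by simp [hblank]), if_neg (by simp [hclose]), if_neg (by simp [hl])]]
            rw [ih (res ++ (p :: blanks) ++ [l]) none trivial]
            rw [show p :: blanks ++ l :: rest = p :: (blanks ++ l :: rest) by simp, hA,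
              pvA_cons_notRpc l rest hl]
            simp [pvPendLines]

-- ===== VERDICT (by name: the statement is the Claim_ definition above) =====
theorem cleanup_empty_rpc_blocks_spec : Claim_equal_cleanup_empty_rpc_blocks := by
  intro body_lines _
  unfold Spec_cleanup_empty_rpc_blocks cleanup_empty_rpc_blocks_alt
  rw [pvMain body_lines [] none trivial]
  simp [pvPendLines]
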